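-- pv_equiv track=rewrite | github.com/InfuseAI/piperider | piperider_cli/compare_report.py | _get_column_changed
-- ===== SOURCE A (Python) =====
-- from typing import Dict, List, Optional
--
-- def _merge_keys(base: List[str], target: List[str]):
--     '''
--     Merge keys from base, target tables. Unlike default union, it preserves the order for column rename, added, removed.
--
--     :param base: keys for base table
--     :param target: keys for base table
--     :return: merged keys
--     '''
--
--     result = []
--     while base and target:
--         if base[0] == target[0]:
--             result.append(base[0])
--             base.pop(0)
--             target.pop(0)
--         elif base[0] in target:
--             idx = target.index(base[0])
--             for i in target[0:idx]:
--                 if i not in result: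
--                     result.append(i)
--             result.append(base[0])
--             base.pop(0)
--             target = target[idx + 1:]
--         else:
--             result.append(base[0])
--             base.pop(0)
--
--     for c in base:
--         if c not in result:
--             result.append(c)
--
--     for c in target:
--         if c not in result:
--             result.append(c)
--
--     return result
--
-- def join(base, target):
--     '''
--     Join base and target to a dict which
--
--     keys = (base keys) +  (target keys)
--     result[keys] = {base: {...}, target: {...}
--
--     :param base:
--     :param target:
--     :return:
--     '''
--     if not base:
--         base = dict()
--     if not target:
--         target = dict()
--
--     keys = _merge_keys(list(base.keys()), list(target.keys()))
--     result = dict()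
--     for key in keys:
--         value = dict()
--         value['base'] = base.get(key)
--         value['target'] = target.get(key)
--         result[key] = value
--     return result
--
-- def _get_column_changed(base, target):
--     columns_b = base.get('columns') if base else None
--     columns_t = target.get('columns') if target else None
--     joined = join(columns_b, columns_t)
--     added = 0
--     deleted = 0
--     changed = 0
--
--     for column_name in joined.keys():
--         joined_column = joined[column_name]
--         b = joined_column.get('base')
--         t = joined_column.get('target')
--
--         schema_type_b = b.get('schema_type') if b else None
--         schema_type_t = t.get('schema_type') if t else None
--
--         if b is None:
--             added += 1
--         elif t is None:
--             deleted += 1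
--         elif schema_type_b != schema_type_t:
--             changed += 1
--
--     return {
--         'added': added,
--         'deleted': deleted,
--         'changed': changed,
--     }
-- ===== SOURCE B (Python) =====
-- def _schema_type(col):
--     return col.get('schema_type') if col else None
--
--
-- def _get_column_changed(base, target):
--     columns_b = (base.get('columns') if base else None) or {}
--     columns_t = (target.get('columns') if target else None) or {}
--     added = 0
--     deleted = 0
--     changed = 0
--     for k in columns_t:
--         if k not in columns_b:
--             added += 1
--     for k in columns_b:
--         if k not in columns_t:
--             deleted += 1
--         elif _schema_type(columns_b[k]) != _schema_type(columns_t[k]):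
--             changed += 1
--     return {
--         'added': added,
--         'deleted': deleted,
--         'changed': changed,
--     }
-- ===== Notes on version B (the rewrite author's own statement) =====
-- stated objective: simpler
-- what changed: B drops A's order-preserving key merge and intermediate joined dict entirely and counts added/deleted/changed in two direct passes over the two column dicts, since the three counts do not depend on key order; the Lean Pre_ only rules out association-list encodings with duplicate column keys, which no real Python dict input can produce.
import Mathlib
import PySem

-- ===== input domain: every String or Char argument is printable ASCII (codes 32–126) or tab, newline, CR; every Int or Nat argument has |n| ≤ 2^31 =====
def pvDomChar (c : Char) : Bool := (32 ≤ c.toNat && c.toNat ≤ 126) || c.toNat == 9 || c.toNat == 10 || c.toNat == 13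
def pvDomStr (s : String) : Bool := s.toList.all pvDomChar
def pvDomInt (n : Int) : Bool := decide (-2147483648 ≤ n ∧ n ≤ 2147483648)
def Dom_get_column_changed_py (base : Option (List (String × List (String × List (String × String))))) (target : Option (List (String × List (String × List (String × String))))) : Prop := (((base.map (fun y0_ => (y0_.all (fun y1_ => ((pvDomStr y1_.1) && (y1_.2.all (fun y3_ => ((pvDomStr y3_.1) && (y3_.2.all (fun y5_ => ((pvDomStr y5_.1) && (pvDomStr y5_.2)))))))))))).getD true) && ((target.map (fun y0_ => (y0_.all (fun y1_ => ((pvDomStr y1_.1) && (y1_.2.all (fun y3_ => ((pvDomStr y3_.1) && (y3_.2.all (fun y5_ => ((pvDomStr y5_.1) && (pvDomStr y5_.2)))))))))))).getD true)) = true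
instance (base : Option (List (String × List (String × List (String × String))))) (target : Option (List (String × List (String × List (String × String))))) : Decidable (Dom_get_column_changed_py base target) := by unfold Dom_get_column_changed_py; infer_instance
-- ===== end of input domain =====

-- B replaces A's order-preserving key merge + intermediate joined dict by two direct counting
-- passes over the column dicts (the three counts do not depend on key order); objective: simpler.

-- ===== PORT A =====

-- the while-loop of _merge_keys; returns (result, remaining base, remaining target).
-- target[0:idx] / target[idx+1:] with a nonnegative Nat index are exactly take/drop.
def pvMergeLoop : List String → List String → List String → List String × List String × List String
  | b0 :: bs, t0 :: ts, result =>
    if b0 = t0 then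
      pvMergeLoop bs ts (result ++ [b0])
    else if b0 ∈ t0 :: ts then
      let idx := (PySem.List.index? (t0 :: ts) b0).getD 0
      let result' := ((t0 :: ts).take idx).foldl (fun r i => if i ∈ r then r else r ++ [i]) result
      pvMergeLoop bs ((t0 :: ts).drop (idx + 1)) (result' ++ [b0])
    else
      pvMergeLoop bs (t0 :: ts) (result ++ [b0])
  | [], t, result => (result, [], t)
  | b0 :: bs, [], result => (result, b0 :: bs, [])

def pvMergeKeys (base target : List String) : List String :=
  let r := pvMergeLoop base target []
  let r2 := r.2.1.foldl (fun acc c => if c ∈ acc then acc else acc ++ [c]) r.1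
  r.2.2.foldl (fun acc c => if c ∈ acc then acc else acc ++ [c]) r2

def pvJoin (base target : List (String × List (String × String))) :
    PySem.Dict String (PySem.Dict String (Option (List (String × String)))) :=
  let keys := pvMergeKeys (base.map Prod.fst) (target.map Prod.fst)
  keys.foldl (fun result key =>
    result.insert key
      ((PySem.Dict.empty.insert "base" ((PySem.Dict.mk base).get? key)).insert "target"
        ((PySem.Dict.mk target).get? key))) PySem.Dict.empty

def get_column_changed_py (base : Option (List (String × List (String × List (String × String))))) (target : Option (List (String × List (String × List (String × String))))) : List (String × Int) :=
  let columns_b : Option (List (String × List (String × String))) :=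
    match base with
    | none => none
    | some d => if d = [] then none else (PySem.Dict.mk d).get? "columns"
  let columns_t : Option (List (String × List (String × String))) :=
    match target with
    | none => none
    | some d => if d = [] then none else (PySem.Dict.mk d).get? "columns"
  let joined := pvJoin (columns_b.getD []) (columns_t.getD [])
  let counts := joined.keys.foldl (fun (acc : Int × Int × Int) column_name =>
    let joined_column := (joined.get? column_name).getD PySem.Dict.empty
    let b := (joined_column.get? "base").getD none
    let t := (joined_column.get? "target").getD none
    let schema_type_b : Option String :=
      match b with
      | none => none
      | some bb => if bb = [] then none else (PySem.Dict.mk bb).get? "schema_type"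
    let schema_type_t : Option String :=
      match t with
      | none => none
      | some tt => if tt = [] then none else (PySem.Dict.mk tt).get? "schema_type"
    if b = none then (acc.1 + 1, acc.2.1, acc.2.2)
    else if t = none then (acc.1, acc.2.1 + 1, acc.2.2)
    else if schema_type_b ≠ schema_type_t then (acc.1, acc.2.1, acc.2.2 + 1)
    else acc) ((0 : Int), (0 : Int), (0 : Int))
  [("added", counts.1), ("deleted", counts.2.1), ("changed", counts.2.2)]

-- ===== PORT B =====

-- col.get('schema_type') if col else None
def pvSchemaType (col : List (String × String)) : Option String :=
  if col = [] then none else (PySem.Dict.mk col).get? "schema_type"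

def get_column_changed_py_alt (base : Option (List (String × List (String × List (String × String))))) (target : Option (List (String × List (String × List (String × String))))) : List (String × Int) :=
  let columns_b : List (String × List (String × String)) :=
    (match base with
     | none => none
     | some d => if d = [] then none else (PySem.Dict.mk d).get? "columns").getD []
  let columns_t : List (String × List (String × String)) :=
    (match target with
     | none => none
     | some d => if d = [] then none else (PySem.Dict.mk d).get? "columns").getD []
  let cb := PySem.Dict.mk columns_b
  let ct := PySem.Dict.mk columns_t
  let added := ct.keys.foldl (fun (a : Int) k => if ¬ cb.contains k then a + 1 else a) 0
  -- columns_b[k] / columns_t[k]: the key is present on every path that reads it, so getD's default is never used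
  let dc := cb.keys.foldl (fun (acc : Int × Int) k =>
    if ¬ ct.contains k then (acc.1 + 1, acc.2)
    else if pvSchemaType (cb.getD k []) ≠ pvSchemaType (ct.getD k []) then (acc.1, acc.2 + 1)
    else acc) ((0 : Int), (0 : Int))
  [("added", added), ("deleted", dc.1), ("changed", dc.2)]

-- ===== PRECONDITION & SPEC =====

-- the effective columns dict of one side, as Pre_ needs it (not used by either port)
def pvCols (o : Option (List (String × List (String × List (String × String))))) : List (String × List (String × String)) :=
  (match o with
   | none => none
   | some d => if d = [] then none else (PySem.Dict.mk d).get? "columns").getD []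

-- Pre_ excludes only association-list encodings whose columns dict carries a duplicate key:
-- a real Python dict has unique keys, so every input the Python programs can receive satisfies Pre_.
def Pre_get_column_changed_py (base : Option (List (String × List (String × List (String × String))))) (target : Option (List (String × List (String × List (String × String))))) : Prop :=
  ((pvCols base).map Prod.fst).Nodup ∧ ((pvCols target).map Prod.fst).Nodup
instance (base : Option (List (String × List (String × List (String × String))))) (target : Option (List (String × List (String × List (String × String))))) : Decidable (Pre_get_column_changed_py base target) := by unfold Pre_get_column_changed_py; infer_instance

def pvWitness_get_column_changed_py : (Option (List (String × List (String × List (String × String))))) × (Option (List (String × List (String × List (String × String))))) :=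
  (some [("columns", [("a", [("schema_type", "int")]), ("b", [])])],
   some [("columns", [("a", [("schema_type", "str")]), ("c", [])])])

def Spec_get_column_changed_py (base : Option (List (String × List (String × List (String × String))))) (target : Option (List (String × List (String × List (String × String))))) (out : List (String × Int)) : Prop := out = get_column_changed_py_alt base target
instance (base : Option (List (String × List (String × List (String × String))))) (target : Option (List (String × List (String × List (String × String))))) (out : List (String × Int)) : Decidable (Spec_get_column_changed_py base target out) := by unfold Spec_get_column_changed_py; infer_instance

-- ===== CLAIM (what is proved, stated in full; the proofs are below) =====
def Claim_equal_get_column_changed_py : Prop := ∀ (base : Option (List (String × List (String × List (String × String))))) (target : Option (List (String × List (String × List (String × String))))), Dom_get_column_changed_py base target → Pre_get_column_changed_py base target → Spec_get_column_changed_py base target (get_column_changed_py base target)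

-- ===== LEMMAS AND PROOFS =====

theorem pv_mem_foldl_appendNew (l r : List String) (x : String) :
    (x ∈ l.foldl (fun acc c => if c ∈ acc then acc else acc ++ [c]) r) ↔ (x ∈ r ∨ x ∈ l) := by
  induction l generalizing r with
  | nil => simp
  | cons c cs ih =>
    simp only [List.foldl_cons, ih]
    by_cases h : c ∈ r <;> simp [h, List.mem_append] <;> aesop

theorem pv_mergeLoop_mem (b t res : List String) (x : String) :
    (x ∈ (pvMergeLoop b t res).1 ∨ x ∈ (pvMergeLoop b t res).2.1 ∨ x ∈ (pvMergeLoop b t res).2.2)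
      ↔ (x ∈ res ∨ x ∈ b ∨ x ∈ t) := by
  induction b, t, res using pvMergeLoop.induct with
  | case1 bs t0 ts result ih =>
    rw [pvMergeLoop]
    simp only [ite_true]
    rw [ih]
    simp [List.mem_append]
    tauto
  | case2 b0 bs t0 ts result hne hmem idx0 result0 ih =>
    obtain ⟨i, hi⟩ := Option.isSome_iff_exists.mp ((PySem.List.index?_isSome_iff (t0 :: ts) b0).2 hmem)
    obtain ⟨pre, suf, hsplit, hlen, -⟩ := (PySem.List.index?_eq_some_iff (t0 :: ts) b0 i).1 hi
    rw [pvMergeLoop]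
    simp only [if_neg hne, if_pos hmem, hi, Option.getD_some]
    have htake : (t0 :: ts).take i = pre := by rw [hsplit, ← hlen]; exact List.take_left
    have hdrop : (t0 :: ts).drop (i + 1) = suf := by
      rw [hsplit, ← hlen]
      have h1 : pre.length + 1 = (pre ++ [b0]).length := by simp
      rw [h1, show pre ++ b0 :: suf = (pre ++ [b0]) ++ suf by simp, List.drop_left]
    simp only [idx0, result0, hi, Option.getD_some, htake, hdrop] at ih
    rw [htake, hdrop]
    rw [ih]
    have hts : ∀ y : String, y ∈ t0 :: ts ↔ y ∈ pre ∨ y = b0 ∨ y ∈ suf := by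
      intro y; rw [hsplit]; simp [List.mem_append]
    simp only [pv_mem_foldl_appendNew, List.mem_append, hts, List.mem_cons]
    tauto
  | case3 b0 bs t0 ts result hne hmem ih =>
    rw [pvMergeLoop]
    simp only [if_neg hne, if_neg hmem, ih]
    simp [List.mem_append]
    tauto
  | case4 t result => simp [pvMergeLoop]
  | case5 b0 bs result => simp [pvMergeLoop]

theorem pv_mergeKeys_mem (kb kt : List String) (x : String) :
    x ∈ pvMergeKeys kb kt ↔ x ∈ kb ∨ x ∈ kt := by
  unfold pvMergeKeys
  simp only [pv_mem_foldl_appendNew]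
  have := pv_mergeLoop_mem kb kt [] x
  simp only [List.not_mem_nil, false_or] at this
  tauto

theorem pv_get?_foldl_insert (l : List String) (f : String → PySem.Dict String (Option (List (String × String)))) (d : PySem.Dict String (PySem.Dict String (Option (List (String × String))))) (x : String) :
    (l.foldl (fun res k => res.insert k (f k)) d).get? x = if x ∈ l then some (f x) else d.get? x := by
  induction l generalizing d with
  | nil => simp
  | cons k ks ih =>
    simp only [List.foldl_cons, ih]
    by_cases hx : x ∈ ks
    · simp [hx]
    · by_cases hk : x = k
      · subst hk; simp [hx, PySem.Dict.get?_insert_self]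
      · simp [hx, hk, PySem.Dict.get?_insert_of_ne _ _ hk]


theorem pv_foldl_count1 (l : List String) (p : String → Prop) [DecidablePred p] (a : Int) :
    l.foldl (fun (acc : Int) k => if p k then acc + 1 else acc) a = a + (l.countP fun k => decide (p k)) := by
  induction l generalizing a with
  | nil => simp
  | cons x xs ih =>
    simp only [List.foldl_cons, List.countP_cons, ih]
    by_cases h : p x <;> simp [h] <;> omega

theorem pv_foldl_count2 (l : List String) (p q : String → Prop) [DecidablePred p] [DecidablePred q] (a b : Int) :
    l.foldl (fun (acc : Int × Int) k =>
        if p k then (acc.1 + 1, acc.2)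
        else if q k then (acc.1, acc.2 + 1)
        else acc) (a, b)
      = (a + (l.countP fun k => decide (p k)), b + (l.countP fun k => decide (¬ p k ∧ q k))) := by
  induction l generalizing a b with
  | nil => simp
  | cons x xs ih =>
    simp only [List.foldl_cons, List.countP_cons]
    by_cases hp : p x <;> by_cases hq : q x <;> simp [hp, hq, ih, Prod.ext_iff] <;> omega

theorem pv_foldl_count3 (l : List String) (p q r : String → Prop) [DecidablePred p] [DecidablePred q] [DecidablePred r] (a b c : Int) :
    l.foldl (fun (acc : Int × Int × Int) k =>
        if p k then (acc.1 + 1, acc.2.1, acc.2.2)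
        else if q k then (acc.1, acc.2.1 + 1, acc.2.2)
        else if r k then (acc.1, acc.2.1, acc.2.2 + 1)
        else acc) (a, b, c)
      = (a + (l.countP fun k => decide (p k)),
         b + (l.countP fun k => decide (¬ p k ∧ q k)),
         c + (l.countP fun k => decide (¬ p k ∧ ¬ q k ∧ r k))) := by
  induction l generalizing a b c with
  | nil => simp
  | cons x xs ih =>
    simp only [List.foldl_cons, List.countP_cons]
    by_cases hp : p x <;> by_cases hq : q x <;> by_cases hr : r x <;>
      simp [hp, hq, hr, ih, Prod.ext_iff] <;> omega

theorem pv_countP_transfer (l l' : List String) (p q : String → Bool)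
    (hl : l.Nodup) (hl' : l'.Nodup)
    (h : ∀ x, (x ∈ l ∧ p x) ↔ (x ∈ l' ∧ q x)) :
    l.countP p = l'.countP q := by
  rw [List.countP_eq_length_filter, List.countP_eq_length_filter]
  have hperm : List.Perm (l.filter p) (l'.filter q) := by
    apply List.perm_of_nodup_nodup_toFinset_eq (hl.filter _) (hl'.filter _)
    ext x
    simp only [List.mem_toFinset, List.mem_filter]
    constructor
    · rintro ⟨hx, hp⟩; exact ⟨((h x).1 ⟨hx, hp⟩).1, ((h x).1 ⟨hx, hp⟩).2⟩
    · rintro ⟨hx, hq⟩; exact ⟨((h x).2 ⟨hx, hq⟩).1, ((h x).2 ⟨hx, hq⟩).2⟩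
  exact hperm.length_eq

-- A's schema_type of an optional column dict (proof-side helper)
def pvStA (o : Option (List (String × String))) : Option String :=
  match o with
  | none => none
  | some bb => if bb = [] then none else (PySem.Dict.mk bb).get? "schema_type"

theorem pv_main (cb ct : List (String × List (String × String)))
    (hb : (cb.map Prod.fst).Nodup) (ht : (ct.map Prod.fst).Nodup) :
    (let joined := pvJoin cb ct
     let counts := joined.keys.foldl (fun (acc : Int × Int × Int) column_name =>
       let joined_column := (joined.get? column_name).getD PySem.Dict.empty
       let b := (joined_column.get? "base").getD none
       let t := (joined_column.get? "target").getD none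
       let schema_type_b : Option String :=
         match b with
         | none => none
         | some bb => if bb = [] then none else (PySem.Dict.mk bb).get? "schema_type"
       let schema_type_t : Option String :=
         match t with
         | none => none
         | some tt => if tt = [] then none else (PySem.Dict.mk tt).get? "schema_type"
       if b = none then (acc.1 + 1, acc.2.1, acc.2.2)
       else if t = none then (acc.1, acc.2.1 + 1, acc.2.2)
       else if schema_type_b ≠ schema_type_t then (acc.1, acc.2.1, acc.2.2 + 1)
       else acc) ((0 : Int), (0 : Int), (0 : Int))
     [("added", counts.1), ("deleted", counts.2.1), ("changed", counts.2.2)])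
    =
    (let cbD := PySem.Dict.mk cb
     let ctD := PySem.Dict.mk ct
     let added := ctD.keys.foldl (fun (a : Int) k => if ¬ cbD.contains k then a + 1 else a) 0
     let dc := cbD.keys.foldl (fun (acc : Int × Int) k =>
       if ¬ ctD.contains k then (acc.1 + 1, acc.2)
       else if pvSchemaType (cbD.getD k []) ≠ pvSchemaType (ctD.getD k []) then (acc.1, acc.2 + 1)
       else acc) ((0 : Int), (0 : Int))
     [("added", added), ("deleted", dc.1), ("changed", dc.2)]) := by
  -- notation
  have hkeysJ : (pvJoin cb ct).keys
      = PySem.Set.ofList (pvMergeKeys (cb.map Prod.fst) (ct.map Prod.fst)) := by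
    unfold pvJoin
    rw [PySem.Dict.keys_foldl_insert]
    rw [PySem.Set.ofList_eq_foldl]
    rfl
  have hmemJ : ∀ x, x ∈ (pvJoin cb ct).keys ↔ x ∈ cb.map Prod.fst ∨ x ∈ ct.map Prod.fst := by
    intro x; rw [hkeysJ, PySem.Set.mem_ofList, pv_mergeKeys_mem]
  have hnodJ : (pvJoin cb ct).keys.Nodup := by rw [hkeysJ]; exact PySem.Set.nodup_ofList _
  have hgetJ : ∀ k ∈ (pvJoin cb ct).keys,
      (pvJoin cb ct).get? k = some ((PySem.Dict.empty.insert "base" ((PySem.Dict.mk cb).get? k)).insert "target" ((PySem.Dict.mk ct).get? k)) := by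
    intro k hk
    rw [hkeysJ, PySem.Set.mem_ofList] at hk
    conv_lhs => rw [pvJoin]
    rw [pv_get?_foldl_insert, if_pos hk]
  -- rewrite A's loop body into a key-only form
  have hbody : (pvJoin cb ct).keys.foldl (fun (acc : Int × Int × Int) column_name =>
       let joined_column := ((pvJoin cb ct).get? column_name).getD PySem.Dict.empty
       let b := (joined_column.get? "base").getD none
       let t := (joined_column.get? "target").getD none
       let schema_type_b : Option String :=
         match b with
         | none => none
         | some bb => if bb = [] then none else (PySem.Dict.mk bb).get? "schema_type"
       let schema_type_t : Option String :=
         match t with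
         | none => none
         | some tt => if tt = [] then none else (PySem.Dict.mk tt).get? "schema_type"
       if b = none then (acc.1 + 1, acc.2.1, acc.2.2)
       else if t = none then (acc.1, acc.2.1 + 1, acc.2.2)
       else if schema_type_b ≠ schema_type_t then (acc.1, acc.2.1, acc.2.2 + 1)
       else acc) ((0 : Int), (0 : Int), (0 : Int))
      = (pvJoin cb ct).keys.foldl (fun (acc : Int × Int × Int) k =>
       if (PySem.Dict.mk cb).get? k = none then (acc.1 + 1, acc.2.1, acc.2.2)
       else if (PySem.Dict.mk ct).get? k = none then (acc.1, acc.2.1 + 1, acc.2.2)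
       else if pvStA ((PySem.Dict.mk cb).get? k) ≠ pvStA ((PySem.Dict.mk ct).get? k) then (acc.1, acc.2.1, acc.2.2 + 1)
       else acc) ((0 : Int), (0 : Int), (0 : Int)) := by
    apply PySem.List.foldl_congr_mem
    intro acc k hk
    rw [hgetJ k hk]
    have hbt : ("base" : String) ≠ "target" := by decide
    simp only [Option.getD_some, PySem.Dict.get?_insert_self,
      PySem.Dict.get?_insert_of_ne _ _ hbt, pvStA]
    rfl
  -- membership / lookup bridges
  have hxb : ∀ x : String, ((PySem.Dict.mk cb).get? x = none) ↔ x ∉ cb.map Prod.fst := by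
    intro x; rw [PySem.Dict.get?_eq_none_iff_not_mem_keys]; simp [PySem.Dict.keys]
  have hxt : ∀ x : String, ((PySem.Dict.mk ct).get? x = none) ↔ x ∉ ct.map Prod.fst := by
    intro x; rw [PySem.Dict.get?_eq_none_iff_not_mem_keys]; simp [PySem.Dict.keys]
  have hcb : ∀ x : String, ((PySem.Dict.mk cb).contains x = true) ↔ x ∈ cb.map Prod.fst := by
    intro x; rw [PySem.Dict.contains_iff_mem_keys]; simp [PySem.Dict.keys]
  have hct : ∀ x : String, ((PySem.Dict.mk ct).contains x = true) ↔ x ∈ ct.map Prod.fst := by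
    intro x; rw [PySem.Dict.contains_iff_mem_keys]; simp [PySem.Dict.keys]
  have hstb : ∀ x : String, x ∈ cb.map Prod.fst →
      pvStA ((PySem.Dict.mk cb).get? x) = pvSchemaType ((PySem.Dict.mk cb).getD x []) := by
    intro x hx
    rcases h : (PySem.Dict.mk cb).get? x with _ | bb
    · exact absurd hx ((hxb x).1 h)
    · rw [PySem.Dict.getD_eq_get?_getD, h]; simp [pvStA, pvSchemaType]
  have hstt : ∀ x : String, x ∈ ct.map Prod.fst →
      pvStA ((PySem.Dict.mk ct).get? x) = pvSchemaType ((PySem.Dict.mk ct).getD x []) := by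
    intro x hx
    rcases h : (PySem.Dict.mk ct).get? x with _ | bb
    · exact absurd hx ((hxt x).1 h)
    · rw [PySem.Dict.getD_eq_get?_getD, h]; simp [pvStA, pvSchemaType]
  -- reduce both sides
  dsimp only
  rw [hbody]
  rw [pv_foldl_count3 (pvJoin cb ct).keys
        (fun k => (PySem.Dict.mk cb).get? k = none)
        (fun k => (PySem.Dict.mk ct).get? k = none)
        (fun k => pvStA ((PySem.Dict.mk cb).get? k) ≠ pvStA ((PySem.Dict.mk ct).get? k))]
  have hkm : (PySem.Dict.mk cb).keys = cb.map Prod.fst := by simp [PySem.Dict.keys]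
  have hktm : (PySem.Dict.mk ct).keys = ct.map Prod.fst := by simp [PySem.Dict.keys]
  rw [hkm, hktm]
  rw [pv_foldl_count1 (ct.map Prod.fst) (fun k => ¬ (PySem.Dict.mk cb).contains k)]
  rw [pv_foldl_count2 (cb.map Prod.fst)
        (fun k => ¬ (PySem.Dict.mk ct).contains k)
        (fun k => pvSchemaType ((PySem.Dict.mk cb).getD k []) ≠ pvSchemaType ((PySem.Dict.mk ct).getD k []))]
  -- the three counts agree
  have hadded : (pvJoin cb ct).keys.countP (fun k => decide ((PySem.Dict.mk cb).get? k = none))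
      = (ct.map Prod.fst).countP (fun k => decide (¬ (PySem.Dict.mk cb).contains k = true)) := by
    apply pv_countP_transfer _ _ _ _ hnodJ ht
    intro x
    simp only [decide_eq_true_eq, hmemJ x, hxb x, hcb x]
    tauto
  have hdeleted : (pvJoin cb ct).keys.countP
        (fun k => decide (¬ (PySem.Dict.mk cb).get? k = none ∧ (PySem.Dict.mk ct).get? k = none))
      = (cb.map Prod.fst).countP (fun k => decide (¬ (PySem.Dict.mk ct).contains k = true)) := by
    apply pv_countP_transfer _ _ _ _ hnodJ hb
    intro x
    simp only [decide_eq_true_eq, hmemJ x, hxb x, hxt x, hct x]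
    tauto
  have hchanged : (pvJoin cb ct).keys.countP
        (fun k => decide (¬ (PySem.Dict.mk cb).get? k = none ∧ ¬ (PySem.Dict.mk ct).get? k = none ∧
            pvStA ((PySem.Dict.mk cb).get? k) ≠ pvStA ((PySem.Dict.mk ct).get? k)))
      = (cb.map Prod.fst).countP (fun k => decide (¬ ¬ (PySem.Dict.mk ct).contains k = true ∧
            pvSchemaType ((PySem.Dict.mk cb).getD k []) ≠ pvSchemaType ((PySem.Dict.mk ct).getD k []))) := by
    apply pv_countP_transfer _ _ _ _ hnodJ hb
    intro x
    simp only [decide_eq_true_eq, hmemJ x, hxb x, hxt x, hct x]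
    constructor
    · rintro ⟨hm, hxcb, hxct, hne⟩
      have hxcb' : x ∈ cb.map Prod.fst := by tauto
      have hxct' : x ∈ ct.map Prod.fst := by tauto
      refine ⟨hxcb', not_not.mpr hxct', ?_⟩
      rw [← hstb x hxcb', ← hstt x hxct']
      exact hne
    · rintro ⟨hxcb', hxct', hne⟩
      have hxct'' : x ∈ ct.map Prod.fst := not_not.mp hxct'
      refine ⟨Or.inl hxcb', by tauto, by tauto, ?_⟩
      rw [hstb x hxcb', hstt x hxct'']
      exact hne
  rw [hadded, hdeleted, hchanged]


-- ===== VERDICT (by name: the statement is the Claim_ definition above) =====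
theorem get_column_changed_py_spec : Claim_equal_get_column_changed_py := by
  intro base target _ hpre
  unfold Spec_get_column_changed_py
  exact pv_main (pvCols base) (pvCols target) hpre.1 hpre.2
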